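/- GENERATED by mk_final_copies.py from the proof of the farm's unit `vorbis_finish_frame.4` (farm:vorbis_finish_frame.4.1: Proof.lean) as the
   re-elaboration sweep compiled it — do not edit. -/
import Asan.CheckWalk
import Vorbis.Spec.Units.vorbis_finish_frame_4

open X86 X86.User Asan Vorbis Vorbis.Spec

set_option maxRecDepth 4000
set_option maxHeartbeats 4000000

namespace Vorbis.Spec.vorbis_finish_frame_4

/-- 32-bit subtraction of two `int`s whose difference is an `int` does not wrap. -/
theorem seg4_toInt_sub (a b : BitVec 32) (h1 : -(2 ^ 31 : Int) ≤ a.toInt - b.toInt) (h2 : a.toInt - b.toInt < 2 ^ 31) :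
    (a - b).toInt = a.toInt - b.toInt := by
  rw [BitVec.toInt_sub]
  simp only [Int.bmod_def]
  omega

/-- The dword pattern of a 32-bit value reads as its signed value. -/
theorem seg4_sint32_toNat (x : BitVec 32) : sint32 x.toNat = x.toInt := by
  have := x.isLt
  unfold sint32
  rw [BitVec.toInt_eq_toNat_cond]
  split <;> split <;> omega

end Vorbis.Spec.vorbis_finish_frame_4

/-- Segment 4 of `vorbis_finish_frame` (`cut4` … `cut4` | `at_107257`, 32 instructions, 5 check sites; stb_vorbis_fixed.c 3518–3520: ONE STEP of
the flattened saving loop `for (i …) for (j = 0; right + j < len; ++j) f->previous_window[i][j] = f->channel_buffers[i][right + j];`). -/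
theorem Vorbis.Spec.Worked.vorbis_finish_frame_4_ok : Vorbis.Spec.vorbis_finish_frame_4.Statement := by
  intro Lay hLay μ hμ u₀ hcode hload4 hload8 hstore4 others frames len A stored room ysz u ret f i j s hat
  -- the entry state's facts, from the assertion
  have he := hat.frame.entry
  have he0 := he
  have hsh := hat.frame.shadow
  have hr := hat.frame.rdi
  have hfp := hat.frame.fin
  have hinv0 := hat.frame.inv0
  v_entry he
  have hsp := hsh.rsp
  have hwhere := hinv0.objLive.where_ hsh.inv hsh.offText (by simp only [Vorbis.Off.sizeof.stb_vorbis]; omega)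
  simp only [Vorbis.Off.sizeof.stb_vorbis] at hwhere
  have hfa : (addr f).toNat = f := toNat_addr f (by omega)
  -- `*f` lies in the arena (the footprint of the contract)
  have har : A.B ≤ f ∧ f + 1808 ≤ A.B + A.L := by
    have hbr := hinv0.arena.block_range (p := f) (n := Off.sizeof.stb_vorbis) hinv0.obj
    have hl := le_r8 Off.sizeof.stb_vorbis
    have h2 := hinv0.arena.AR2
    simp only [Vorbis.Off.sizeof.stb_vorbis] at hbr hl
    omega
  obtain ⟨j_rip, hfr, j_r14, j_r13, hilt, hjle, j_prev, hinv, hobj⟩ := hat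
  obtain ⟨_, _, _, _, _, j_rsp, j_rbx, j_eq, habi, hs0, hs1, hs2, hs3, hs4, hs5, hs6, hlen, hright, hleft, hsame, hun, hacc⟩ := hfr
  have hdf : s.flags .df = false := habi.1
  have hmx : s.mxcsr &&& 0x1F80 = 0x1F80 := habi.2
  have w_rip := j_rip
  have w_eq := j_eq
  obtain ⟨ch, rch⟩ : ∃ ch, s.mem.readLE (addr f + 4) 4 = ch := ⟨_, rfl⟩
  -- the numbers: `i < 16` (HD1), `right`, `len` as 32-bit values, `right + j` does not wrap
  have hcfg0 := Real.VorbisOK.config hinv0.fb.vorbis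
  have hcfg := Real.VorbisOK.config hinv.fb.vorbis
  have hchan0 := hcfg0.header.HD1
  have hi16 : i < 16 := by omega
  have hf32 : f < 2 ^ 32 := by omega
  have hd3 := (hcfg0.header.HD3).toMdct
  have hb1e := hd3.blocksize_1_eq
  have hb1f := hd3.b1.facts
  generalize hln : Word.part .w32 (u.reg .rsi) = ln at *
  generalize hrt : Word.part .w32 (u.reg .rcx) = rt at *
  have hfp' : FinishPre (stb_vorbis.blocksize_1 u.mem f) ln.toInt (s32 (u.reg .rdx)) rt.toInt := by
    rw [← hln, ← hrt]
    exact hfp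
  have hjle' : j = 0 ∨ rt.toInt + (j : Int) ≤ ln.toInt := by
    rw [← hln, ← hrt]
    exact hjle
  have hrt0 := hfp'.right_nonneg
  have hrtb := hfp'.right_b1
  have hlnb := hfp'.len_b1
  have hrtn : (rt.toNat : Int) = rt.toInt := by
    have hlt := rt.isLt
    rw [BitVec.toInt_eq_toNat_cond] at hrt0 ⊢
    split at hrt0 <;> split <;> omega
  have hrj : rt.toNat + j < 2 ^ 31 := by omega
  have eI := Vorbis.Spec.vorbis_finish_frame.ff_sext_ofNat i (by omega)
  have eJ := Vorbis.Spec.vorbis_finish_frame.ff_sext_ofNat j (by omega)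
  have eRJ := Vorbis.Spec.vorbis_finish_frame.ff_sext_add32 j rt hrj
  have eRJi := Vorbis.Spec.vorbis_finish_frame.ff_add32_toInt j rt hrj
  have eCc := Vorbis.Spec.vorbis_finish_frame.ff_cb_check_addr f i hf32 hi16
  have eCl := Vorbis.Spec.vorbis_finish_frame.ff_cb_load_addr f i hf32 hi16
  have ePc := Vorbis.Spec.vorbis_finish_frame.ff_pw_check_addr f i hf32 hi16
  have ePl := Vorbis.Spec.vorbis_finish_frame.ff_pw_load_addr f i hf32 hi16
  have hAc : (addr (f + 872 + 8 * i)).toNat = f + 872 + 8 * i := toNat_addr _ (by omega)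
  have hAp : (addr (f + 1128 + 8 * i)).toNat = f + 1128 + 8 * i := toNat_addr _ (by omega)
  -- the two buffers of channel `i`, in the present memory: live blocks of `4 b1` resp. `2 b1` bytes
  have hbs : bsize s.mem f 1 = bsize u.mem f 1 := (Mdct.ReadsEq.of_objEq (hobj.sub (by decide))).bsize 1
  have hilt' : (i : Int) < stb_vorbis.channels s.mem f := by
    have e := hobj.i32 4 (by decide)
    simp only [vacc, voff] at hilt ⊢
    rw [e]
    exact hilt
  obtain ⟨cb, rcb⟩ : ∃ cb, stb_vorbis.channel_buffers s.mem f i = cb := ⟨_, rfl⟩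
  obtain ⟨pw, rpw⟩ : ∃ pw, stb_vorbis.previous_window s.mem f i = pw := ⟨_, rfl⟩
  have hcbL : LiveIn others frames cb (4 * bsize u.mem f 1) := by
    have h := hinv.bufLive (SampleBuf.chan i hilt') (by simp only []; omega)
    simp only [] at h
    rw [rcb, hbs] at h
    exact h
  have hpwL : LiveIn others frames pw (2 * bsize u.mem f 1) := by
    have h := hinv.bufLive (SampleBuf.prev i hilt') (by simp only []; omega)
    simp only [] at h
    rw [rpw, hbs] at h
    exact h
  have hcbW := hcbL.where_ hsh.inv hsh.offText (by omega)
  have hpwW := hpwL.where_ hsh.inv hsh.offText (by omega)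
  have rcb' : s.mem.readLE (addr (f + 872 + 8 * i)) 8 = cb := by
    rw [← rcb]
    simp only [vacc, voff]
    rfl
  have rpw' : s.mem.readLE (addr (f + 1128 + 8 * i)) 8 = pw := by
    rw [← rpw]
    simp only [vacc, voff]
    rfl
  -- `channels` as the dword the outer test loads
  have hchv : stb_vorbis.channels s.mem f = sint32 ch := by
    simp only [vacc, voff]
    unfold Mem.i32 Mem.u32
    rw [← addr_add_lit, rch]
  have hchlt : ch < 2 ^ 32 := by
    rw [← rch]
    exact X86.User.Mem.readLE_lt' _ _ 4
  have hchs := hcfg.header.HD1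
  rw [hchv] at hchs
  have hch : 1 ≤ ch ∧ ch ≤ 16 ∧ sint32 ch = (ch : Int) := by
    unfold sint32 at hchs ⊢
    split at hchs <;> split <;> omega
  have hchu : stb_vorbis.channels u.mem f = (ch : Int) := by
    have e := hobj.i32 4 (by decide)
    simp only [vacc, voff] at hchv ⊢
    rw [← e, hchv]
    exact hch.2.2
  -- the stack window misses `*f` and every allocated block
  have hstk_ok : StoreOK (RunBlk A len) s.mem f ⟨(u.reg .rsp).toNat - 144, (u.reg .rsp).toNat⟩ := by
    apply StoreOK.off
    intro B hB
    have := hinv.offStack B hB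
    simp only []
    omega
  have hstk_off : (u.reg .rsp).toNat ≤ f ∨ f + 1808 ≤ (u.reg .rsp).toNat - 144 := by
    omega
  u_walk hcode [hμ.vendor] until [Vorbis.L.vorbis_finish_frame.cut4, Vorbis.L.vorbis_finish_frame.at_107257] span [Vorbis.L.textLo, Vorbis.L.textHi] side (v_side)
  case check_1071df =>
    have hun1 : ShadowUntouched s.mem s_1071df.mem := by v_untouched
    have hun' : ShadowUntouched u.mem s_1071df.mem := Mem.EqOn.trans hun hun1
    rw [eI, eCc]
    refine hinv0.objLive.accSmall hsh.inv hun' _ 8 (by decide) (by omega) ?_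
    simp only [Vorbis.Off.sizeof.stb_vorbis]
    omega
  case check_107200 =>
    have hun1 : ShadowUntouched s.mem s_107200.mem := by v_untouched
    have hun' : ShadowUntouched u.mem s_107200.mem := Mem.EqOn.trans hun hun1
    rw [eI, ePc]
    refine hinv0.objLive.accSmall hsh.inv hun' _ 8 (by decide) (by omega) ?_
    simp only [Vorbis.Off.sizeof.stb_vorbis]
    omega
  case check_107214 =>
    have hun1 : ShadowUntouched s.mem s_107214.mem := by v_untouched
    have hun' : ShadowUntouched u.mem s_107214.mem := Mem.EqOn.trans hun hun1
    rw [eRJi] at hbr_10723a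
    rw [eRJ, eI, eCl, rcb', Vorbis.Spec.vorbis_finish_frame.ff_elem_addr cb (rt.toNat + j) (by omega) (by omega)]
    have hA : (addr (cb + 4 * (rt.toNat + j))).toNat = cb + 4 * (rt.toNat + j) := toNat_addr _ (by omega)
    refine hcbL.accSmall hsh.inv hun' _ 4 (by decide) (by omega) ?_
    omega
  case check_10721f =>
    have hun1 : ShadowUntouched s.mem s_10721f.mem := by v_untouched
    have hun' : ShadowUntouched u.mem s_10721f.mem := Mem.EqOn.trans hun hun1
    rw [eRJi] at hbr_10723a
    have hsw := hfp'.save_write (j := (j : Int)) (by omega) (by omega)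
    rw [eJ, eI, ePl, rpw', Vorbis.Spec.vorbis_finish_frame.ff_elem_addr pw j (by omega) (by omega)]
    have hA : (addr (pw + 4 * j)).toNat = pw + 4 * j := toNat_addr _ (by omega)
    refine hpwL.accSmall hsh.inv hun' _ 4 (by decide) (by omega) ?_
    omega
  case side_code =>
    rw [eRJi] at hbr_10723a
    have hsw := hfp'.save_write (j := (j : Int)) (by omega) (by omega)
    rw [eJ, eI, ePl, rpw', Vorbis.Spec.vorbis_finish_frame.ff_elem_addr pw j (by omega) (by omega)]
    have hA : (addr (pw + 4 * j)).toNat = pw + 4 * j := toNat_addr _ (by omega)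
    omega
  case check_107244 =>
    have hun1 : ShadowUntouched s.mem s_107244.mem := by v_untouched
    have hun' : ShadowUntouched u.mem s_107244.mem := Mem.EqOn.trans hun hun1
    refine hinv0.objLive.accSmall hsh.inv hun' _ 4 (by decide) (by u_omega) ?_
    simp only [Vorbis.Off.sizeof.stb_vorbis]
    u_omega
  · -- the body was run: back at the head with `(i, j + 1)`
    refine ReachVia.done (Or.inl ?_)
    rw [eRJi] at hbr_10723a
    have hsw := hfp'.save_write (j := (j : Int)) (by omega) (by omega)
    have hA : (addr (pw + 4 * j)).toNat = pw + 4 * j := toNat_addr _ (by omega)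
    rw [eJ, eI, ePl, rpw', Vorbis.Spec.vorbis_finish_frame.ff_elem_addr pw j (by omega) (by omega)] at w_mem
    -- … and the range fact of the store in the same form (`u_resolve` looks it up by the address)
    rw [eJ, eI, ePl, rpw', Vorbis.Spec.vorbis_finish_frame.ff_elem_addr pw j (by omega) (by omega)] at w_acc_10721f
    -- `previous_window[i]` is a setup block of the arena, apart from `*f`
    have hpwA : A.B ≤ pw ∧ pw + 2 * bsize u.mem f 1 ≤ A.B + A.L := by
      rcases hinv.buf _ (SampleBuf.prev i hilt') with h0 | hb
      · simp only [] at h0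
        omega
      · have hbr := hinv.arena.block_range (p := stb_vorbis.previous_window s.mem f i) (n := 2 * bsize s.mem f 1) hb
        have hl := le_r8 (2 * bsize s.mem f 1)
        have h2 := hinv.arena.AR2
        rw [rpw, hbs] at hbr
        rw [hbs] at hl
        omega
    have hpwO : pw + 2 * bsize u.mem f 1 ≤ f ∨ f + 1808 ≤ pw := by
      have hd := hinv.sep.bufobj _ (SampleBuf.prev i hilt')
      simp only [vblock, voff] at hd
      rw [rpw, hbs] at hd
      omega
    -- where the stored float is: off the stack (the form the slot reads need)
    have hloc : (u.reg .rsp).toNat + 8 ≤ pw + 4 * j ∨ pw + 4 * j + 4 ≤ 7340032 ∨ 8388608 ≤ pw + 4 * j := by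
      omega
    have hloc2 : 1154368 ≤ pw + 4 * j ∧ pw + 4 * j + 4 ≤ 12582912 := by
      omega
    have hst : Mem.SameExcept [⟨(u.reg .rsp).toNat - 144, (u.reg .rsp).toNat⟩, ⟨pw + 4 * j, pw + 4 * j + 4⟩] s.mem s_107228.mem := by
      rw [w_mem]
      u_same
    have hun1 : ShadowUntouched s.mem s_107228.mem := by v_untouched
    have hc := Vorbis.Spec.vorbis_finish_frame.ff_inv_off hinv hst (by
      intro sp hmem
      simp only [List.mem_cons, List.mem_nil_iff, or_false] at hmem
      rcases hmem with rfl | rfl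
      · exact hstk_ok
      · refine StoreOK.buffer _ (SampleBuf.prev i hilt') ?_ ?_
        · simp only []
          rw [rpw]
          omega
        · simp only []
          rw [rpw, hbs]
          omega) (by
      intro sp hmem
      simp only [List.mem_cons, List.mem_nil_iff, or_false] at hmem
      rcases hmem with rfl | rfl
      · simp only []
        exact hstk_off
      · simp only []
        omega) hun1
    have hsameN : Mem.SameExcept [⟨(u.reg .rsp).toNat - 144, (u.reg .rsp).toNat⟩, ⟨A.B, A.B + A.L⟩] u.mem s_107228.mem := by
      apply hsame.trans
      apply hst.mono
      intro sp hmem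
      simp only [List.mem_cons, List.mem_nil_iff, or_false] at hmem
      rcases hmem with rfl | rfl
      · intro a ha1 ha2
        exact ⟨_, List.mem_cons_self, ha1, ha2⟩
      · intro a ha1 ha2
        simp only [] at ha1 ha2
        refine ⟨_, List.mem_cons_of_mem _ List.mem_cons_self, ?_, ?_⟩
        · simp only []
          omega
        · simp only []
          omega
    -- (the slot reads below go through the float store: keep the one location fact `hloc`, drop the other disjunctions)
    clear hcbW hpwW hjle' hjle hpwO hstk_off hwhere hpwA
    refine ⟨w_rip, ⟨he0, hr, hsh, hinv0, hfp, w_rsp, ?rbx, w_eq, ?abi, ?_, ?_, ?_, ?_, ?_, ?_, ?_, ?_, ?_, ?_, hsameN,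
      Mem.EqOn.trans hun hun1, hacc⟩, ?r14, ?r13, hilt, ?jle, ?prev, hc.1, ObjEq.trans hobj (hc.2.sub (by decide))⟩
    case rbx =>
      rw [w_kept.get .rbx rfl]
      exact j_rbx
    case abi => v_inv
    case r14 =>
      rw [w_kept.get .r14 rfl]
      exact j_r14
    case r13 =>
      rw [w_r13]
      exact Vorbis.Spec.vorbis_finish_frame.ff_inc32_ofNat j (by omega)
    case jle =>
      right
      show (Word.part .w32 (u.reg .rcx)).toInt + ((j + 1 : Nat) : Int) ≤ (Word.part .w32 (u.reg .rsi)).toInt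
      rw [hln, hrt]
      omega
    case prev => u_resolve
    all_goals u_resolve
    · rw [hln]
    · rw [hrt]
  · -- the inner loop is over, `i + 1 ≥ channels`: the exit of the saving loops
    refine ReachVia.done (Or.inr (Or.inr ?_))
    have hst : Mem.SameExcept [⟨(u.reg .rsp).toNat - 144, (u.reg .rsp).toNat⟩] s.mem s_10724d.mem := by
      rw [w_mem]
      u_same
    have hun1 : ShadowUntouched s.mem s_10724d.mem := by v_untouched
    have hc := Vorbis.Spec.vorbis_finish_frame.ff_inv_off hinv hst (by
      intro sp hmem
      simp only [List.mem_cons, List.mem_nil_iff, or_false] at hmem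
      rcases hmem with rfl
      exact hstk_ok) (by
      intro sp hmem
      simp only [List.mem_cons, List.mem_nil_iff, or_false] at hmem
      rcases hmem with rfl
      simp only []
      exact hstk_off) hun1
    have hsameN : Mem.SameExcept [⟨(u.reg .rsp).toNat - 144, (u.reg .rsp).toNat⟩, ⟨A.B, A.B + A.L⟩] u.mem s_10724d.mem := by
      apply hsame.trans
      apply hst.mono
      intro sp hmem
      simp only [List.mem_cons, List.mem_nil_iff, or_false] at hmem
      rcases hmem with rfl
      intro a ha1 ha2
      exact ⟨_, List.mem_cons_self, ha1, ha2⟩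
    refine ⟨w_rip, ⟨he0, hr, hsh, hinv0, hfp, w_rsp, ?rbx, w_eq, ?abi, ?_, ?_, ?_, ?_, ?_, ?_, ?_, ?_, ?_, ?_, hsameN,
      Mem.EqOn.trans hun hun1, hacc⟩, ?prev, hc.1, ObjEq.trans hobj (hc.2.sub (by decide))⟩
    case rbx =>
      rw [w_kept.get .rbx rfl]
      exact j_rbx
    case abi => v_inv
    case prev => u_resolve
    all_goals u_resolve
    · rw [hln]
    · rw [hrt]
  · -- the inner loop is over, `i + 1 < channels`: the head with `(i + 1, 0)`
    refine ReachVia.done (Or.inr (Or.inl ?_))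
    have hst : Mem.SameExcept [⟨(u.reg .rsp).toNat - 144, (u.reg .rsp).toNat⟩] s.mem s_107255.mem := by
      rw [w_mem]
      u_same
    have hun1 : ShadowUntouched s.mem s_107255.mem := by v_untouched
    have hc := Vorbis.Spec.vorbis_finish_frame.ff_inv_off hinv hst (by
      intro sp hmem
      simp only [List.mem_cons, List.mem_nil_iff, or_false] at hmem
      rcases hmem with rfl
      exact hstk_ok) (by
      intro sp hmem
      simp only [List.mem_cons, List.mem_nil_iff, or_false] at hmem
      rcases hmem with rfl
      simp only []
      exact hstk_off) hun1
    have hsameN : Mem.SameExcept [⟨(u.reg .rsp).toNat - 144, (u.reg .rsp).toNat⟩, ⟨A.B, A.B + A.L⟩] u.mem s_107255.mem := by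
      apply hsame.trans
      apply hst.mono
      intro sp hmem
      simp only [List.mem_cons, List.mem_nil_iff, or_false] at hmem
      rcases hmem with rfl
      intro a ha1 ha2
      exact ⟨_, List.mem_cons_self, ha1, ha2⟩
    rw [Vorbis.Spec.vorbis_finish_frame.ff_inc32_toInt i (by omega), Vorbis.Spec.vorbis_finish_frame.ff_ofNat32_toInt ch (by omega)] at hbr_10724d
    refine ⟨w_rip, ⟨he0, hr, hsh, hinv0, hfp, w_rsp, ?rbx, w_eq, ?abi, ?_, ?_, ?_, ?_, ?_, ?_, ?_, ?_, ?_, ?_, hsameN,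
      Mem.EqOn.trans hun hun1, hacc⟩, ?r14, w_r13, ?ilt, Or.inl rfl, ?prev, hc.1, ObjEq.trans hobj (hc.2.sub (by decide))⟩
    case rbx =>
      rw [w_kept.get .rbx rfl]
      exact j_rbx
    case abi => v_inv
    case r14 =>
      rw [w_r14]
      exact Vorbis.Spec.vorbis_finish_frame.ff_inc32_ofNat i (by omega)
    case ilt =>
      rw [hchu]
      omega
    case prev => u_resolve
    all_goals u_resolve
    · rw [hln]
    · rw [hrt]
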